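-- pv_equiv track=rewrite | github.com/wiksat/WDI2021 | WDI/6.16.py | isEvenFivesNumberInOctal
-- ===== SOURCE A (Python) =====
-- def isEvenFivesNumberInOctal(number):
--     fives = 0
--     while number > 0:
--         w = number % 8
--         number //= 8
--         if w == 5:
--             fives += 1
--     return fives%2==0
-- ===== SOURCE B (Python) =====
-- def isEvenFivesNumberInOctal(number):
--     s = oct(number)[2:] if number > 0 else ''
--     return s.count('5') % 2 == 0
-- ===== Notes on version B (the rewrite author's own statement) =====
-- stated objective: idiomatic
-- what changed: Replaces the manual remainder-and-quotient digit-peeling loop with building the octal string once via oct() and counting '5' characters with str.count.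
import Mathlib
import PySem

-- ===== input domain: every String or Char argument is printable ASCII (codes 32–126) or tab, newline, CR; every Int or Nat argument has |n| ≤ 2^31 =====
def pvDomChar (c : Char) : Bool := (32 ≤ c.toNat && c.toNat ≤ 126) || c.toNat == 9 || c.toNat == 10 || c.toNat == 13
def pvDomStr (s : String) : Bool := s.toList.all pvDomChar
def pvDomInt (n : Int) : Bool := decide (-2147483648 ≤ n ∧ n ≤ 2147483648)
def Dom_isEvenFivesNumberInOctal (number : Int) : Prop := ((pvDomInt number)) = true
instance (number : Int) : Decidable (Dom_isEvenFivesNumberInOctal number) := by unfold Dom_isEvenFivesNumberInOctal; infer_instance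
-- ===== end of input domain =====

-- B builds the octal digit string once (like Python's oct()) and counts '5' characters,
-- instead of A's manual remainder-and-quotient digit-peeling loop; objective: idiomatic.


-- ===== PORT A =====
-- the while-loop of A: state (number, fives)
def pvLoopA (number : Int) (fives : Int) : Int :=
  if 0 < number then
    let w := PySem.Int.mod number 8
    pvLoopA (PySem.Int.floordiv number 8) (if w == 5 then fives + 1 else fives)
  else fives
termination_by number.toNat
decreasing_by
  rename_i h
  rw [PySem.Int.floordiv_eq_ediv_of_pos (by norm_num)]
  omega

def isEvenFivesNumberInOctal (number : Int) : Bool :=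
  PySem.Int.mod (pvLoopA number 0) 2 == 0

-- ===== PORT B =====
-- oct(n)[2:] for n > 0, as its list of characters (most significant digit first)
def pvOctChars (n : Nat) : List Char :=
  if n = 0 then [] else pvOctChars (n / 8) ++ [Char.ofNat (48 + n % 8)]
termination_by n
decreasing_by exact Nat.div_lt_self (Nat.pos_of_ne_zero (by assumption)) (by norm_num)

def isEvenFivesNumberInOctal_alt (number : Int) : Bool :=
  let s : List Char := if 0 < number then pvOctChars number.toNat else []
  (s.count '5') % 2 == 0

-- ===== PRECONDITION & SPEC =====
def Spec_isEvenFivesNumberInOctal (number : Int) (out : Bool) : Prop := out = isEvenFivesNumberInOctal_alt number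
instance (number : Int) (out : Bool) : Decidable (Spec_isEvenFivesNumberInOctal number out) := by unfold Spec_isEvenFivesNumberInOctal; infer_instance

-- ===== CLAIM (what is proved, stated in full; the proofs are below) =====
def Claim_equal_isEvenFivesNumberInOctal : Prop := ∀ (number : Int), Dom_isEvenFivesNumberInOctal number → Spec_isEvenFivesNumberInOctal number (isEvenFivesNumberInOctal number)

-- ===== LEMMAS AND PROOFS =====

lemma pvLoopA_count (n : Nat) : ∀ f : Int,
    pvLoopA (n : Int) f = f + ((pvOctChars n).count '5' : Int) := by
  induction n using Nat.strong_induction_on with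
  | _ n ih =>
    intro f
    rw [pvLoopA]
    by_cases h0 : n = 0
    · subst h0; simp [pvOctChars]
    · have hn : (0:Int) < (n : Int) := by exact_mod_cast Nat.pos_of_ne_zero h0
      rw [if_pos hn]
      rw [show PySem.Int.floordiv (n : Int) 8 = ((n / 8 : Nat) : Int) from by
            exact_mod_cast PySem.Int.floordiv_natCast n 8,
          show PySem.Int.mod (n : Int) 8 = ((n % 8 : Nat) : Int) from by
            exact_mod_cast PySem.Int.mod_natCast n 8]
      rw [ih (n / 8) (Nat.div_lt_self (Nat.pos_of_ne_zero h0) (by norm_num))]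
      conv_rhs => rw [pvOctChars]
      rw [if_neg h0, List.count_append]
      have h8 : n % 8 < 8 := Nat.mod_lt _ (by norm_num)
      -- the appended digit is '5' exactly when n % 8 = 5
      set m := n % 8 with hm
      interval_cases m <;> (simp; try ring)

lemma pvCount_mod_eq (c : Nat) :
    (PySem.Int.mod (c : Int) 2 == 0) = (c % 2 == 0) := by
  rw [show PySem.Int.mod (c : Int) 2 = ((c % 2 : Nat) : Int) from by
        exact_mod_cast PySem.Int.mod_natCast c 2]
  rcases Nat.mod_two_eq_zero_or_one c with h | h <;> simp [h]

-- ===== VERDICT (by name: the statement is the Claim_ definition above) =====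
theorem isEvenFivesNumberInOctal_spec : Claim_equal_isEvenFivesNumberInOctal := by
  intro number _
  unfold Spec_isEvenFivesNumberInOctal isEvenFivesNumberInOctal isEvenFivesNumberInOctal_alt
  by_cases h : 0 < number
  · have hcast : ((number.toNat : Int)) = number := Int.toNat_of_nonneg (le_of_lt h)
    have hA : pvLoopA number 0 = ((pvOctChars number.toNat).count '5' : Int) := by
      rw [← hcast, pvLoopA_count number.toNat 0, zero_add, Int.toNat_natCast]
    rw [hA, if_pos h]
    exact pvCount_mod_eq _
  · rw [pvLoopA, if_neg h, if_neg h]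
    simp [PySem.Int.mod]
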